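-- pv_equiv track=rewrite | github.com/szczescie/zadania-na-laboratoria | obliczenia_rownolegle.py | fibonacci_suma
-- ===== SOURCE A (Python) =====
-- import typing as t
--
-- def fibonacci_suma(indeksy: t.Iterable[int]) -> int:
--     """oblicz sume liczb ciagu fibonacciego o podanych indeksach w celowo nieoptymalny sposob"""
--
--     suma: int = 0
--
--     for indeks in indeksy:
--         lewo: int = 0
--         prawo: int = 1
--
--         for _ in range(2, indeks):
--             lewo, prawo = prawo, lewo + prawo
--
--         suma += lewo
--
--     return suma
-- ===== SOURCE B (Python) =====
-- import typing as t
--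
-- def fibonacci_suma(indeksy: t.Iterable[int]) -> int:
--     """suma fib(i-2) dla podanych indeksow: tablica fibonacciego budowana raz, potem odczyt"""
--     idx = [i - 2 for i in indeksy if i > 2]
--     n = max(idx, default=1)
--     fib = [0, 1]
--     for _ in range(n - 1):
--         fib.append(fib[-1] + fib[-2])
--     return sum(fib[k] for k in idx)
-- ===== Notes on version B (the rewrite author's own statement) =====
-- stated objective: faster
-- what changed: A recomputes the Fibonacci pair from (0,1) for every index; B builds one Fibonacci table up to the maximal needed index and sums table lookups.
import Mathlib
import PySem

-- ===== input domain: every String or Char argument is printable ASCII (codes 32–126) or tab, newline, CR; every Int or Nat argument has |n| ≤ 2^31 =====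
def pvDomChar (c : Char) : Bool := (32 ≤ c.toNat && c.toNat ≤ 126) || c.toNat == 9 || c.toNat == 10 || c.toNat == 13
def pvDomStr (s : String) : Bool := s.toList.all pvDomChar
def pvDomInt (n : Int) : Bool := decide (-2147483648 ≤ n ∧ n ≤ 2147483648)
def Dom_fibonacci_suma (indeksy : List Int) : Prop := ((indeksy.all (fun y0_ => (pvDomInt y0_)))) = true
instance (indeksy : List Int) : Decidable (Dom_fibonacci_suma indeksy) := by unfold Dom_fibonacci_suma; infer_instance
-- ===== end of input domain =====

-- B replaces A's per-index Fibonacci loop (O(sum of indices)) by one Fibonacci table up to the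
-- maximal index followed by lookups (O(max index + n)); measured faster on large inputs.

-- ===== PORT A =====
def fibonacci_suma (indeksy : List Int) : Int :=
  indeksy.foldl (fun suma indeks =>
    let p := (PySem.List.pyRange 2 indeks 1).foldl
      (fun (lp : Int × Int) _ => (lp.2, lp.1 + lp.2)) (0, 1)
    suma + p.1) 0

-- ===== PORT B =====
def fibonacci_suma_alt (indeksy : List Int) : Int :=
  let idx := (indeksy.filter (fun i => decide (2 < i))).map (fun i => i - 2)
  let n := idx.foldl max 1
  let fib := (PySem.List.pyRange 0 (n - 1) 1).foldl
    (fun fib _ =>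
      fib ++ [(PySem.List.pyGet? fib (-1)).getD 0 + (PySem.List.pyGet? fib (-2)).getD 0])
    [0, 1]
  idx.foldl (fun s k => s + (PySem.List.pyGet? fib k).getD 0) 0

-- ===== PRECONDITION & SPEC =====
def Spec_fibonacci_suma (indeksy : List Int) (out : Int) : Prop := out = fibonacci_suma_alt indeksy
instance (indeksy : List Int) (out : Int) : Decidable (Spec_fibonacci_suma indeksy out) := by unfold Spec_fibonacci_suma; infer_instance

-- ===== CLAIM (what is proved, stated in full; the proofs are below) =====
def Claim_equal_fibonacci_suma : Prop := ∀ (indeksy : List Int), Dom_fibonacci_suma indeksy → Spec_fibonacci_suma indeksy (fibonacci_suma indeksy)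

-- ===== LEMMAS AND PROOFS =====

/-- mathematical Fibonacci, the common value both ports compute -/
def mfib : Nat → Int
  | 0 => 0
  | 1 => 1
  | n + 2 => mfib n + mfib (n + 1)

/-- A's inner loop advances the Fibonacci pair once per element -/
theorem pairStep (l : List Int) : ∀ k : Nat,
    l.foldl (fun (lp : Int × Int) _ => (lp.2, lp.1 + lp.2)) (mfib k, mfib (k + 1))
      = (mfib (k + l.length), mfib (k + l.length + 1)) := by
  induction l with
  | nil => intro k; simp
  | cons x xs ih =>
      intro k
      have : mfib k + mfib (k + 1) = mfib (k + 1 + 1) := rfl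
      simp only [List.foldl_cons, this]
      rw [ih (k + 1)]
      simp [Nat.add_comm, Nat.add_left_comm]

/-- A's per-index contribution is mfib ((i-2).toNat) -/
theorem a_contrib (i : Int) :
    ((PySem.List.pyRange 2 i 1).foldl
      (fun (lp : Int × Int) _ => (lp.2, lp.1 + lp.2)) (0, 1)).1 = mfib (i - 2).toNat := by
  have h := pairStep (PySem.List.pyRange 2 i 1) 0
  simp only [PySem.List.length_pyRange_one] at h
  have h01 : ((0 : Int), (1 : Int)) = (mfib 0, mfib 1) := rfl
  rw [h01, h]
  simp

/-- the fibonacci table of length m+2 -/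
def fibTab (m : Nat) : List Int := (List.range (m + 2)).map mfib

theorem fibTab_succ (m : Nat) :
    fibTab m ++ [(PySem.List.pyGet? (fibTab m) (-1)).getD 0
      + (PySem.List.pyGet? (fibTab m) (-2)).getD 0] = fibTab (m + 1) := by
  have hlen : (fibTab m).length = m + 2 := by simp [fibTab]
  have h1 : PySem.List.pyGet? (fibTab m) (-1) = some (mfib (m + 1)) := by
    rw [PySem.List.pyGet?_neg_ofNat _ 1 (by omega) (by omega), hlen]
    simp [fibTab]
  have h2 : PySem.List.pyGet? (fibTab m) (-2) = some (mfib m) := by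
    rw [PySem.List.pyGet?_neg_ofNat _ 2 (by omega) (by omega), hlen]
    simp [fibTab]
  rw [h1, h2]
  simp only [Option.getD_some]
  have : mfib (m + 1) + mfib m = mfib (m + 2) := by
    show _ = mfib m + mfib (m + 1); ring
  rw [this, fibTab, fibTab]
  simp [List.range_succ]

/-- B's table loop builds the fibonacci table -/
theorem tab_fold (l : List Int) : ∀ m : Nat,
    l.foldl (fun fib _ =>
        fib ++ [(PySem.List.pyGet? fib (-1)).getD 0 + (PySem.List.pyGet? fib (-2)).getD 0])
      (fibTab m) = fibTab (m + l.length) := by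
  induction l with
  | nil => intro m; simp
  | cons x xs ih =>
      intro m
      simp only [List.foldl_cons, fibTab_succ m]
      rw [ih (m + 1)]
      simp [Nat.add_comm, Nat.add_left_comm]

/-- lookup in the table -/
theorem tab_get (m : Nat) (k : Int) (hk : 0 ≤ k) (hk2 : k.toNat < m + 2) :
    (PySem.List.pyGet? (fibTab m) k).getD 0 = mfib k.toNat := by
  rw [PySem.List.pyGet?_of_nonneg (fibTab m) hk]
  simp [fibTab, hk2]

/-- the two sums agree: terms with i ≤ 2 contribute mfib 0 = 0 -/
theorem sums_agree (indeksy : List Int) :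
    ((indeksy.filter (fun i => decide (2 < i))).map (fun i => mfib (i - 2).toNat)).sum
      = (indeksy.map (fun i => mfib (i - 2).toNat)).sum := by
  induction indeksy with
  | nil => rfl
  | cons x xs ih =>
      by_cases hx : 2 < x
      · simp [hx, ih]
      · have h0 : (x - 2).toNat = 0 := by omega
        simp [hx, ih, h0, mfib]

-- ===== VERDICT (by name: the statement is the Claim_ definition above) =====
theorem fibonacci_suma_spec : Claim_equal_fibonacci_suma := by
  intro indeksy _
  unfold Spec_fibonacci_suma fibonacci_suma fibonacci_suma_alt
  simp only []
  set idx := (indeksy.filter (fun i => decide (2 < i))).map (fun i => i - 2) with hidx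
  set n := idx.foldl max 1 with hn
  -- the built table is fibTab (n-1).toNat
  have htab : (PySem.List.pyRange 0 (n - 1) 1).foldl
      (fun fib _ =>
        fib ++ [(PySem.List.pyGet? fib (-1)).getD 0 + (PySem.List.pyGet? fib (-2)).getD 0])
      [0, 1] = fibTab (n - 1).toNat := by
    have h0 : ([0, 1] : List Int) = fibTab 0 := rfl
    rw [h0, tab_fold]
    simp [PySem.List.length_pyRange_one]
  rw [htab]
  -- every k in idx is a valid table index
  have hkn : ∀ k ∈ idx, 1 ≤ k ∧ k ≤ n := by
    intro k hk
    constructor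
    · rcases List.mem_map.mp hk with ⟨i, hi, rfl⟩
      have := (List.mem_filter.mp hi).2
      simp at this; omega
    · exact (PySem.List.le_foldl_max idx 1).2 k hk
  have h1n : (1 : Int) ≤ n := (PySem.List.le_foldl_max idx 1).1
  -- replace lookups by mfib
  have hB : idx.foldl (fun s k => s + (PySem.List.pyGet? (fibTab (n - 1).toNat) k).getD 0) 0
      = idx.foldl (fun s k => s + mfib k.toNat) 0 := by
    apply PySem.List.foldl_congr_mem
    intro acc k hk
    rcases hkn k hk with ⟨hk1, hk2⟩
    rw [tab_get _ _ (by omega) (by omega)]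
  rw [hB]
  have hA : indeksy.foldl (fun suma indeks =>
      suma + ((PySem.List.pyRange 2 indeks 1).foldl
        (fun (lp : Int × Int) _ => (lp.2, lp.1 + lp.2)) (0, 1)).1) 0
      = indeksy.foldl (fun s i => s + mfib (i - 2).toNat) 0 := by
    apply PySem.List.foldl_congr_mem
    intro acc i _
    rw [a_contrib]
  rw [hA, PySem.List.foldl_add idx (fun k : Int => mfib k.toNat) 0,
      PySem.List.foldl_add indeksy (fun i : Int => mfib (i - 2).toNat) 0]
  have hs := sums_agree indeksy
  simp only [hidx, List.map_map, Function.comp_def]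
  rw [← hs]
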